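-- pv_equiv track=rewrite | github.com/TFlexSoom/shors-algorithm | shors.py | get_small_factors
-- ===== SOURCE A (Python) =====
-- primes = [
--     2,
--     3,
--     5,
--     7,
--     11,
--     13,
--     17,
--     19,
--     23,
--     29,
-- ]  # There are more prime numbers but this is good enough for us for now
--
-- def get_small_factors(n: int, factors: list):
--     if n <= 0:
--         raise RuntimeError("Cannot check if pk on number <= 0")
--
--     if n == 1:
--         return n
--
--     for num in primes:
--         while n % num == 0:
--             n //= num
--             factors.append(num)
--
--     return n
-- ===== SOURCE B (Python) =====
-- primes = [2, 3, 5, 7, 11, 13, 17, 19, 23, 29]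
--
-- def get_small_factors(n: int, factors: list):
--     if n <= 0:
--         raise RuntimeError("Cannot check if pk on number <= 0")
--     if n == 1:
--         return n
--     while True:
--         for p in primes:
--             if n % p == 0:
--                 n //= p
--                 factors.append(p)
--                 break
--         else:
--             return n
-- ===== Notes on version B (the rewrite author's own statement) =====
-- stated objective: alternative
-- what changed: Replaced the per-prime draining while-loop nested in a for over primes by a single outer loop that each iteration rescans the prime list for the first divisor of the current n, divides once, and stops when no listed prime divides; identical residual and factor-append order.
import Mathlib
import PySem

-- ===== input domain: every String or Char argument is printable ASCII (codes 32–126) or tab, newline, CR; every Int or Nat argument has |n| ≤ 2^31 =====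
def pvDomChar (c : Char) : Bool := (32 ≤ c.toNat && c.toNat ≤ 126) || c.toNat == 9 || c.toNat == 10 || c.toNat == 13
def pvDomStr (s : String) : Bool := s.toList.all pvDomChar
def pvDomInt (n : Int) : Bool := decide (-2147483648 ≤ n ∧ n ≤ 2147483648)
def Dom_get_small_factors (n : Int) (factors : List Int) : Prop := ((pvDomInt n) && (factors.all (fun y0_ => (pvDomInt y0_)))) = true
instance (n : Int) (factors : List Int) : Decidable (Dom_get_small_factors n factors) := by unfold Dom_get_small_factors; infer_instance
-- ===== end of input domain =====

-- B restructures A's nested for/while trial division into one loop that rescans the prime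
-- list for the first divisor each time; equal return value on Pre_ (A mutates `factors`
-- in place; this equivalence is about the RETURN value only, and B performs the same
-- appends in the same order).

-- the module-level constant `primes`
def primesP : List Int := [2, 3, 5, 7, 11, 13, 17, 19, 23, 29]

-- termination helper cited by both ports' decreasing_by
theorem pvDivShrink (n p : Int) (hp : 2 ≤ p) (hn : 1 ≤ n)
    (hd : PySem.Int.mod n p = 0) : (PySem.Int.floordiv n p).toNat < n.toNat := by
  have hdvd : p ∣ n := (PySem.Int.mod_eq_zero_iff_dvd n p).mp hd
  have heq : PySem.Int.floordiv n p = n / p :=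
    PySem.Int.floordiv_eq_ediv_of_pos (by omega)
  obtain ⟨k, hk⟩ := hdvd
  have hdk : n / p = k := by rw [hk]; exact Int.mul_ediv_cancel_left k (by omega)
  have hk1 : 1 ≤ k := by
    by_contra h
    push_neg at h
    have : p * k ≤ 0 := mul_nonpos_of_nonneg_of_nonpos (by omega) (by omega)
    linarith
  have h2k : 2 * k ≤ p * k := mul_le_mul_of_nonneg_right hp (by omega)
  have hkn : k < n := by linarith
  rw [heq, hdk]
  omega

-- ===== PORT A =====
-- inner `while n % num == 0: n //= num` (the 2 ≤ num / 1 ≤ n conjuncts are totality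
-- guards only; they hold whenever the Python loop runs on an input admitted by Pre_)
def divideOutA (n num : Int) : Int :=
  if h : 2 ≤ num ∧ 1 ≤ n ∧ PySem.Int.mod n num = 0 then
    divideOutA (PySem.Int.floordiv n num) num
  else n
termination_by n.toNat
decreasing_by exact pvDivShrink n num h.1 h.2.1 h.2.2

def get_small_factors (n : Int) (factors : List Int) : Int :=
  if n ≤ 0 then 0           -- Python raises RuntimeError here; excluded by Pre_
  else if n = 1 then n
  else primesP.foldl (fun acc num => divideOutA acc num) n

-- ===== PORT B =====
-- the inner `for p in primes: if n % p == 0: … break / else: return n`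
def findDiv (n : Int) : List Int → Option Int
  | [] => none
  | p :: rest => if PySem.Int.mod n p = 0 then some p else findDiv n rest

-- the outer `while True` loop (guard conjuncts are totality guards, as in port A)
def bLoop (n : Int) : Int :=
  match findDiv n primesP with
  | some p =>
      if h : 2 ≤ p ∧ 1 ≤ n ∧ PySem.Int.mod n p = 0 then
        bLoop (PySem.Int.floordiv n p)
      else n
  | none => n
termination_by n.toNat
decreasing_by exact pvDivShrink n p h.1 h.2.1 h.2.2

def get_small_factors_alt (n : Int) (factors : List Int) : Int :=
  if n ≤ 0 then 0           -- Python raises RuntimeError here; excluded by Pre_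
  else if n = 1 then n
  else bLoop n

-- ===== PRECONDITION & SPEC =====
-- exactly the inputs where the Python A returns (it raises RuntimeError for n <= 0)
def Pre_get_small_factors (n : Int) (factors : List Int) : Prop := 1 ≤ n
instance (n : Int) (factors : List Int) : Decidable (Pre_get_small_factors n factors) := by
  unfold Pre_get_small_factors; infer_instance

def pvWitness_get_small_factors : Int × List Int := (12, [])

def Spec_get_small_factors (n : Int) (factors : List Int) (out : Int) : Prop := out = get_small_factors_alt n factors
instance (n : Int) (factors : List Int) (out : Int) : Decidable (Spec_get_small_factors n factors out) := by unfold Spec_get_small_factors; infer_instance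

-- ===== CLAIM (what is proved, stated in full; the proofs are below) =====
def Claim_equal_get_small_factors : Prop := ∀ (n : Int) (factors : List Int), Dom_get_small_factors n factors → Pre_get_small_factors n factors → Spec_get_small_factors n factors (get_small_factors n factors)

-- ===== LEMMAS AND PROOFS =====

theorem primesP_two_le : ∀ p ∈ primesP, 2 ≤ p := by decide

theorem findDiv_eq_none (n : Int) (ps : List Int)
    (h : ∀ p ∈ ps, PySem.Int.mod n p ≠ 0) : findDiv n ps = none := by
  induction ps with
  | nil => rfl
  | cons p rest ih =>
      simp only [findDiv]
      rw [if_neg (h p (by simp))]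
      exact ih fun q hq => h q (by simp [hq])

theorem findDiv_append_first (n : Int) (pre : List Int) (p : Int) (rest : List Int)
    (hpre : ∀ q ∈ pre, PySem.Int.mod n q ≠ 0) (hd : PySem.Int.mod n p = 0) :
    findDiv n (pre ++ p :: rest) = some p := by
  induction pre with
  | nil => simp [findDiv, hd]
  | cons q pre' ih =>
      simp only [List.cons_append, findDiv]
      rw [if_neg (hpre q (by simp))]
      exact ih fun r hr => hpre r (by simp [hr])

-- the loop-level invariant: once every prime already passed by A's fold fails to divide n,
-- A's remaining fold equals B's full rescanning loop
theorem key (m : Nat) : ∀ (n : Int), n.toNat = m → 1 ≤ n →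
    ∀ (pre ps : List Int), pre ++ ps = primesP →
    (∀ q ∈ pre, PySem.Int.mod n q ≠ 0) →
    List.foldl (fun acc num => divideOutA acc num) n ps = bLoop n := by
  induction m using Nat.strong_induction_on with
  | _ m IH =>
    intro n hm hn pre ps hsplit hpre
    induction ps generalizing pre with
    | nil =>
        rw [List.append_nil] at hsplit
        subst hsplit
        rw [List.foldl_nil, bLoop, findDiv_eq_none n primesP hpre]
    | cons p rest ihps =>
        have hp2 : 2 ≤ p := primesP_two_le p (by rw [← hsplit]; simp)
        by_cases hd : PySem.Int.mod n p = 0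
        · -- p is the first listed divisor of n: both sides step to n // p
          obtain ⟨k, hk⟩ := (PySem.Int.mod_eq_zero_iff_dvd n p).mp hd
          have hfd : PySem.Int.floordiv n p = k := by
            rw [PySem.Int.floordiv_eq_ediv_of_pos (show (0:Int) < p by omega), hk]
            exact Int.mul_ediv_cancel_left k (by omega)
          have hk1 : 1 ≤ k := by
            by_contra h
            push_neg at h
            have : p * k ≤ 0 := mul_nonpos_of_nonneg_of_nonpos (by omega) (by omega)
            linarith
          have h2k : 2 * k ≤ p * k := mul_le_mul_of_nonneg_right hp2 (by omega)
          have hkn : k < n := by linarith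
          have hstepA : divideOutA n p = divideOutA (PySem.Int.floordiv n p) p := by
            rw [divideOutA]; rw [dif_pos ⟨hp2, hn, hd⟩]
          have hfind : findDiv n primesP = some p := by
            rw [← hsplit]; exact findDiv_append_first n pre p rest hpre hd
          have hstepB : bLoop n = bLoop (PySem.Int.floordiv n p) := by
            rw [bLoop, hfind]; exact dif_pos ⟨hp2, hn, hd⟩
          have hpre' : ∀ q ∈ pre, PySem.Int.mod (PySem.Int.floordiv n p) q ≠ 0 := by
            intro q hq hcon
            apply hpre q hq
            have hqk : q ∣ k := by
              rw [hfd] at hcon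
              exact (PySem.Int.mod_eq_zero_iff_dvd k q).mp hcon
            exact (PySem.Int.mod_eq_zero_iff_dvd n q).mpr (by
              rw [hk]; exact Dvd.dvd.mul_left hqk p)
          have hlt : k.toNat < m := by omega
          have hrec := IH k.toNat hlt (PySem.Int.floordiv n p)
            (by rw [hfd]) (by rw [hfd]; exact hk1) pre (p :: rest) hsplit hpre'
          simp only [List.foldl_cons] at hrec ⊢
          rw [hstepA, hstepB]
          exact hrec
        · -- p does not divide n: A's fold skips it, and B never selects it either
          have hstepA : divideOutA n p = n := by
            rw [divideOutA]
            rw [dif_neg (by intro h; exact hd h.2.2)]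
          rw [List.foldl_cons, hstepA]
          exact ihps (pre ++ [p]) (by simpa using hsplit)
            (by intro q hq
                rcases List.mem_append.mp hq with h | h
                · exact hpre q h
                · simp at h; subst h; exact hd)

-- ===== VERDICT (by name: the statement is the Claim_ definition above) =====
theorem get_small_factors_spec : Claim_equal_get_small_factors := by
  intro n factors _ hpre
  unfold Spec_get_small_factors get_small_factors get_small_factors_alt
  have hn : 1 ≤ n := hpre
  by_cases h1 : n = 1
  · simp only [if_neg (show ¬ n ≤ 0 by omega), if_pos h1]
  · simp only [if_neg (show ¬ n ≤ 0 by omega), if_neg h1]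
    exact key n.toNat n rfl hn [] primesP rfl (by intro q hq; simp at hq)
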